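-- pv_equiv track=rewrite | github.com/kunal-gh/genai-pcb-platform | src/services/verification_reporting.py | _prioritize_violations
-- ===== SOURCE A (Python) =====
-- from typing import Dict, Any, List, Optional
--
-- def _prioritize_violations(violations: List[Dict[str, Any]]) -> Dict[str, List[Dict[str, Any]]]:
--     """Prioritize violations by severity and impact."""
--     priorities = {
--         "critical": [],
--         "high": [],
--         "medium": [],
--         "low": []
--     }
--
--     for violation in violations:
--         priority = violation.get("priority", "medium")
--         if priority in priorities:
--             priorities[priority].append(violation)
--
--     return priorities
-- ===== SOURCE B (Python) =====
-- from typing import Dict, Any, List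
--
-- def _prioritize_violations(violations: List[Dict[str, Any]]) -> Dict[str, List[Dict[str, Any]]]:
--     """Prioritize violations by severity and impact."""
--     return {
--         p: [v for v in violations if v.get("priority", "medium") == p]
--         for p in ["critical", "high", "medium", "low"]
--     }
-- ===== Notes on version B (the rewrite author's own statement) =====
-- stated objective: simpler
-- what changed: Replaced the single mutating dispatch pass over a pre-built dict of empty buckets by a dict comprehension that makes one independent filtering scan per fixed priority category.
import Mathlib
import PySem

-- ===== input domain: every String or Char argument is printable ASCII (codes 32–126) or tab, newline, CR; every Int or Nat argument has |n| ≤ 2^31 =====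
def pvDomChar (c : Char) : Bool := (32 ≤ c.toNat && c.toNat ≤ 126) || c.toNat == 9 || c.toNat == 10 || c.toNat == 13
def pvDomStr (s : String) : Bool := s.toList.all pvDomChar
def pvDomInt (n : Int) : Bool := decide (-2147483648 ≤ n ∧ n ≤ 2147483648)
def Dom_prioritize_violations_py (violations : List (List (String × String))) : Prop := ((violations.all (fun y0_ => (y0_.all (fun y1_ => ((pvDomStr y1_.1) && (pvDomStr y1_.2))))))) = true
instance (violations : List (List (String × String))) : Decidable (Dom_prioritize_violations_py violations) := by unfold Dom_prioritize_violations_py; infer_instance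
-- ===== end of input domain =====

-- B replaces A's single mutating dispatch pass by one independent filter per fixed category (objective: simpler).

-- ===== PORT A =====
-- the priority of a violation: violation.get("priority", "medium")
def pvPriority (v : List (String × String)) : String :=
  (PySem.Dict.mk v).getD "priority" "medium"

def prioritize_violations_py (violations : List (List (String × String))) : List (String × List (List (String × String))) :=
  let init : PySem.Dict String (List (List (String × String))) :=
    PySem.Dict.ofList [("critical", []), ("high", []), ("medium", []), ("low", [])]
  let d := violations.foldl (fun d v =>
    let priority := pvPriority v
    if d.contains priority then d.modify priority [] (· ++ [v]) else d) init
  d.items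

-- ===== PORT B =====
def prioritize_violations_py_alt (violations : List (List (String × String))) : List (String × List (List (String × String))) :=
  ["critical", "high", "medium", "low"].map (fun p =>
    (p, violations.filter (fun v => pvPriority v == p)))

-- ===== PRECONDITION & SPEC =====
def Spec_prioritize_violations_py (violations : List (List (String × String))) (out : List (String × List (List (String × String)))) : Prop := out = prioritize_violations_py_alt violations
instance (violations : List (List (String × String))) (out : List (String × List (List (String × String)))) : Decidable (Spec_prioritize_violations_py violations out) := by unfold Spec_prioritize_violations_py; infer_instance

-- ===== CLAIM (what is proved, stated in full; the proofs are below) =====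
def Claim_equal_prioritize_violations_py : Prop := ∀ (violations : List (List (String × String))), Dom_prioritize_violations_py violations → Spec_prioritize_violations_py violations (prioritize_violations_py violations)

-- ===== LEMMAS AND PROOFS =====

-- the loop body of A
def pvStep (d : PySem.Dict String (List (List (String × String)))) (v : List (String × String)) : PySem.Dict String (List (List (String × String))) :=
  if d.contains (pvPriority v) then d.modify (pvPriority v) [] (· ++ [v]) else d

theorem pvStep_keys (d : PySem.Dict String (List (List (String × String)))) (v : List (String × String)) :
    (pvStep d v).keys = d.keys := by
  unfold pvStep; split_ifs with h
  · rw [PySem.Dict.keys_modify, PySem.Dict.keys_insert_of_contains]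
    simpa using h
  · rfl

theorem pvFold_keys (l : List (List (String × String))) (d : PySem.Dict String (List (List (String × String)))) :
    (l.foldl pvStep d).keys = d.keys := by
  induction l generalizing d with
  | nil => rfl
  | cons v l ih => simpa [List.foldl, pvStep_keys] using ih (pvStep d v)

theorem pvFold_getD (l : List (List (String × String))) (d : PySem.Dict String (List (List (String × String))))
    (k : String) (hk : k ∈ d.keys) :
    (l.foldl pvStep d).getD k [] = d.getD k [] ++ (l.filter (fun v => pvPriority v == k)) := by
  induction l generalizing d with
  | nil => simp
  | cons v l ih =>
    have hk' : k ∈ (pvStep d v).keys := by rw [pvStep_keys]; exact hk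
    have := ih (pvStep d v) hk'
    rw [List.foldl_cons, this]
    by_cases hpv : pvPriority v = k
    · have hc : d.contains (pvPriority v) = true := by
        rw [hpv]; exact (PySem.Dict.contains_iff_mem_keys d k).mpr hk
      have hstep : (pvStep d v).getD k [] = d.getD k [] ++ [v] := by
        unfold pvStep
        rw [if_pos hc, ← hpv, PySem.Dict.getD_modify_self]
      rw [hstep]
      simp [hpv]
    · have hstep : (pvStep d v).getD k [] = d.getD k [] := by
        unfold pvStep; split_ifs with h
        · rw [PySem.Dict.getD_modify, if_neg (fun he => hpv he.symm)]
        · rfl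
      rw [hstep]
      have : (pvPriority v == k) = false := by simpa using hpv
      simp [this]

-- ===== VERDICT (by name: the statement is the Claim_ definition above) =====
theorem prioritize_violations_py_spec : Claim_equal_prioritize_violations_py := by
  intro violations _
  unfold Spec_prioritize_violations_py prioritize_violations_py prioritize_violations_py_alt
  set d0 : PySem.Dict String (List (List (String × String))) :=
    PySem.Dict.ofList [("critical", []), ("high", []), ("medium", []), ("low", [])] with hd0
  show (violations.foldl pvStep d0).items = _
  have hkeys : (violations.foldl pvStep d0).keys = ["critical", "high", "medium", "low"] := by
    rw [pvFold_keys]; decide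
  have hnd : (violations.foldl pvStep d0).keys.Nodup := by rw [hkeys]; decide
  rw [PySem.Dict.items_eq_map_keys _ hnd ([] : List (List (String × String))), hkeys]
  apply List.map_congr_left
  intro k hkmem
  have hk0 : k ∈ d0.keys := by rw [← pvFold_keys violations d0, hkeys]; exact hkmem
  rw [pvFold_getD violations d0 k hk0]
  have hz : d0.getD k [] = [] := by
    fin_cases hkmem <;> decide
  rw [hz, List.nil_append]
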